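-- pv_equiv track=rewrite | github.com/jonasRower/FEM-Python | Program/kodovaCislaDoVypoctu.py | vytvorVektorVsechKodovychCisel
-- ===== SOURCE A (Python) =====
-- def vytvorVektorVsechKodovychCisel(kodovaCisla):
--
--     vsechnaKodovaCisla = []
--
--     # vytvori seznam vsech kodovych cisel, ktere vsak mohou byt duplicitni
--     for i in range(0, len(kodovaCisla)):
--         kodovaCislaElementu = kodovaCisla[i]
--         vsechnaKodovaCisla = vsechnaKodovaCisla + kodovaCislaElementu
--
--     # ke kazdemu indexu pole nalezi pocet vyskytu kodovych cisel
--     poctyKodovychCisel = []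
--     vsechnaKodovaCislaUnikatni = []
--
--     for i in range(0, len(vsechnaKodovaCisla)):
--         kodoveCisloAktualni = i
--         pocetKodovychCisel = vsechnaKodovaCisla.count(kodoveCisloAktualni)
--         if (pocetKodovychCisel > 0):
--             vsechnaKodovaCislaUnikatni.append(kodoveCisloAktualni)
--
--     return(vsechnaKodovaCislaUnikatni)
-- ===== SOURCE B (Python) =====
-- def vytvorVektorVsechKodovychCisel(kodovaCisla):
--     v = [x for sub in kodovaCisla for x in sub]
--     n = len(v)
--     return sorted({x for x in v if 0 <= x < n})
-- ===== Notes on version B (the rewrite author's own statement) =====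
-- stated objective: faster
-- what changed: Instead of probing every integer i in range(len(v)) with a full list.count scan, B flattens by comprehension, builds a set of the distinct values once, keeps those in [0, len(v)), and sorts them.
import Mathlib
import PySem

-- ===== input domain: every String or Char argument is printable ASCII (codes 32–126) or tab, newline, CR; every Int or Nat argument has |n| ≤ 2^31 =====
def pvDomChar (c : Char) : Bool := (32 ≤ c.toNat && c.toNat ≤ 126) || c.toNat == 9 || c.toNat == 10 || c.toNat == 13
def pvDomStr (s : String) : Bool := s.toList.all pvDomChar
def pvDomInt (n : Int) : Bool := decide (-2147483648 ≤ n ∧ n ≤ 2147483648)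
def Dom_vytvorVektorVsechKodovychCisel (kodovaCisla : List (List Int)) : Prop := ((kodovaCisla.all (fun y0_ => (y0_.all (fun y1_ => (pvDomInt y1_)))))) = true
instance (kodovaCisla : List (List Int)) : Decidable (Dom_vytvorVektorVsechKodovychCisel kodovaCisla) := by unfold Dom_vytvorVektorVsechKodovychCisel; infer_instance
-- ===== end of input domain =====

-- B replaces A's scan over range(len(v)) with a count per candidate by a set of the
-- values filtered to [0, len(v)) and sorted (objective: faster).

-- ===== PORT A =====
def vytvorVektorVsechKodovychCisel (kodovaCisla : List (List Int)) : List Int :=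
  -- for i in range(0, len(kodovaCisla)): vsechnaKodovaCisla = vsechnaKodovaCisla + kodovaCisla[i]
  let vsechnaKodovaCisla : List Int :=
    (PySem.List.pyRange 0 kodovaCisla.length 1).foldl
      (fun acc i => acc ++ PySem.List.pyGetD kodovaCisla i []) []
  -- for i in range(0, len(vsechnaKodovaCisla)): if vsechnaKodovaCisla.count(i) > 0: append(i)
  (PySem.List.pyRange 0 vsechnaKodovaCisla.length 1).foldl
    (fun acc i => if vsechnaKodovaCisla.count i > 0 then acc ++ [i] else acc) []

-- ===== PORT B =====
def vytvorVektorVsechKodovychCisel_alt (kodovaCisla : List (List Int)) : List Int :=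
  -- v = [x for sub in kodovaCisla for x in sub]
  let v : List Int := kodovaCisla.flatMap (fun sub => sub)
  -- n = len(v)
  let n : Int := v.length
  -- sorted({x for x in v if 0 <= x < n})
  PySem.List.sorted (PySem.Set.ofList (v.filter (fun x => 0 ≤ x ∧ x < n))) (fun x => x) false

-- ===== PRECONDITION & SPEC =====
def Spec_vytvorVektorVsechKodovychCisel (kodovaCisla : List (List Int)) (out : List Int) : Prop := out = vytvorVektorVsechKodovychCisel_alt kodovaCisla
instance (kodovaCisla : List (List Int)) (out : List Int) : Decidable (Spec_vytvorVektorVsechKodovychCisel kodovaCisla out) := by unfold Spec_vytvorVektorVsechKodovychCisel; infer_instance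

-- ===== CLAIM (what is proved, stated in full; the proofs are below) =====
def Claim_equal_vytvorVektorVsechKodovychCisel : Prop := ∀ (kodovaCisla : List (List Int)), Dom_vytvorVektorVsechKodovychCisel kodovaCisla → Spec_vytvorVektorVsechKodovychCisel kodovaCisla (vytvorVektorVsechKodovychCisel kodovaCisla)

-- ===== LEMMAS AND PROOFS =====

-- A's first loop builds the flattening of kodovaCisla.
theorem pvA_flatten (kodovaCisla : List (List Int)) :
    (PySem.List.pyRange 0 kodovaCisla.length 1).foldl
      (fun acc i => acc ++ PySem.List.pyGetD kodovaCisla i []) []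
    = kodovaCisla.flatMap (fun sub => sub) := by
  rw [PySem.List.foldl_pyRange_zero_pyGetD' kodovaCisla [] (fun acc l => acc ++ l) []]
  induction kodovaCisla using List.reverseRecOn with
  | nil => simp
  | append_singleton xs x ih => simp [List.foldl_append, ih]

-- A's second loop is the in-range filter of the integers 0 … len v - 1.
theorem pvA_filter (v : List Int) :
    (PySem.List.pyRange 0 v.length 1).foldl
      (fun acc i => if v.count i > 0 then acc ++ [i] else acc) []
    = (PySem.List.pyRange 0 v.length 1).filter (fun i => v.count i > 0) := by
  simpa using PySem.List.foldl_append_if_eq_filter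
    (l := PySem.List.pyRange 0 v.length 1) (p := fun i => v.count i > 0) (acc := [])

theorem pv_main (v : List Int) :
    (PySem.List.pyRange 0 v.length 1).filter (fun i => v.count i > 0)
    = PySem.List.sorted (PySem.Set.ofList (v.filter (fun x => 0 ≤ x ∧ x < (v.length : Int)))) (fun x => x) false := by
  apply Eq.symm
  apply PySem.List.sorted_eq_of_perm_of_pairwise_lt
  · -- permutation: both are nodup with the same membership
    rw [List.perm_ext_iff_of_nodup]
    · intro x
      simp only [List.mem_filter, PySem.List.mem_pyRange_one, PySem.Set.mem_ofList,
        decide_eq_true_eq, List.count_pos_iff]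
      constructor
      · rintro ⟨⟨h0, h1⟩, hm⟩; exact ⟨hm, h0, h1⟩
      · rintro ⟨hm, h0, h1⟩; exact ⟨⟨h0, h1⟩, hm⟩
    · exact (PySem.List.pairwise_lt_pyRange_one 0 (v.length : Int)).filter _ |>.nodup
    · exact PySem.Set.nodup_ofList _
  · exact (PySem.List.pairwise_lt_pyRange_one 0 (v.length : Int)).filter _

-- ===== VERDICT (by name: the statement is the Claim_ definition above) =====
theorem vytvorVektorVsechKodovychCisel_spec : Claim_equal_vytvorVektorVsechKodovychCisel := by
  intro kodovaCisla _
  unfold Spec_vytvorVektorVsechKodovychCisel vytvorVektorVsechKodovychCisel vytvorVektorVsechKodovychCisel_alt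
  rw [pvA_flatten, pvA_filter, pv_main]
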